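-- pv_equiv track=rewrite | github.com/ishaanbuildsthings/leetcode | problems/Leetcode/484. Find Permutation.py | findPermutation
-- ===== SOURCE A (Python) =====
-- from typing import List
--
-- def findPermutation(s: str) -> List[int]:
--     n = len(s) + 1 # length of result
--     res = list(range(1, n + 1))
--     i = 0
--     while i < len(s):
--         if s[i] == 'I':
--             i += 1
--             continue
--         j = i
--         while j < len(s) and s[j] == 'D':
--             j += 1
--         # i...j-1 is the D chain
--         # a chain of length 3 is responsible for 3 gaps, so 4 elements
--         chainWidth = (j - 1 - i + 1)
--         elementsAffected = chainWidth + 1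
--         res[i:i+elementsAffected] = res[i:i+elementsAffected][::-1]
--         i = i + elementsAffected
--
--     return res
-- ===== SOURCE B (Python) =====
-- from typing import List
--
-- def findPermutation(s: str) -> List[int]:
--     res = []
--     stack = []
--     for i in range(len(s) + 1):
--         stack.append(i + 1)
--         if i == len(s) or s[i] != 'D':
--             while stack:
--                 res.append(stack.pop())
--     return res
-- ===== Notes on version B (the rewrite author's own statement) =====
-- stated objective: idiomatic
-- what changed: Replaced A's preallocated 1..n list with in-place slice reversals of each maximal 'D' run by the standard one-pass stack algorithm: push i+1 each step and flush the stack into the output at every non-'D' position and at the end; this also avoids A's repeated slice copying, a constant-factor speedup.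
import Mathlib
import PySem

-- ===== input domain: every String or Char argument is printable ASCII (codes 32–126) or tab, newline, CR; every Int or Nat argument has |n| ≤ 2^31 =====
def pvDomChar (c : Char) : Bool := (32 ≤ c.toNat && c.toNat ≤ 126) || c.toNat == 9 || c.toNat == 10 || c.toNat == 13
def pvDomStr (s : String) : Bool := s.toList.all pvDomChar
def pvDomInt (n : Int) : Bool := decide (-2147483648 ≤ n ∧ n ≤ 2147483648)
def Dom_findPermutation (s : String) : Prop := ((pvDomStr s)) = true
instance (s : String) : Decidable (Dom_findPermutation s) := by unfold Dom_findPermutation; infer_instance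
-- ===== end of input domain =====

-- B replaces A's in-place slice-reversal of each maximal 'D' run by the idiomatic one-pass
-- stack algorithm (push each value, flush the stack at every non-'D' position and at the end).

-- ===== PORT A =====
-- inner while: j scans forward over the 'D' chain
def dScan (cs : List Char) (j : Nat) : Nat :=
  if _h : j < cs.length ∧ cs.getD j ' ' = 'D' then dScan cs (j + 1) else j
termination_by cs.length - j
decreasing_by omega

-- outer while loop of A; slice assignment res[i:i+e] = res[i:i+e][::-1] is ported exactly as
-- take/drop/reverse (both indices are nonnegative here and clamp like Python slices)
def loopA (cs : List Char) (res : List Int) (i : Nat) : List Int :=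
  if _h : i < cs.length then
    if cs.getD i ' ' = 'I' then loopA cs res (i + 1)
    else
      let j := dScan cs i
      let chainWidth := j - i
      let e := chainWidth + 1
      let res' := res.take i ++ ((res.drop i).take e).reverse ++ res.drop (i + e)
      loopA cs res' (i + e)
  else res
termination_by cs.length - i
decreasing_by all_goals omega

def findPermutation (s : String) : List Int :=
  let cs := s.toList
  let n := cs.length + 1
  let res := List.map (fun k : Nat => (k : Int) + 1) (List.range n)   -- list(range(1, n+1))
  loopA cs res 0

-- ===== PORT B =====
-- Python's stack list (append/pop at the end) is modelled head-first: push = cons, and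
-- "while stack: res.append(stack.pop())" = res ++ stack
def loopB (cs : List Char) (i : Nat) (stack : List Int) (res : List Int) : List Int :=
  if i < cs.length + 1 then
    let stack' := ((i : Int) + 1) :: stack
    if i = cs.length ∨ cs.getD i ' ' ≠ 'D' then
      loopB cs (i + 1) [] (res ++ stack')
    else
      loopB cs (i + 1) stack' res
  else res
termination_by cs.length + 1 - i
decreasing_by all_goals omega

def findPermutation_alt (s : String) : List Int :=
  loopB s.toList 0 [] []

-- ===== PRECONDITION & SPEC =====
def Spec_findPermutation (s : String) (out : List Int) : Prop := out = findPermutation_alt s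
instance (s : String) (out : List Int) : Decidable (Spec_findPermutation s out) := by unfold Spec_findPermutation; infer_instance

-- ===== CLAIM (what is proved, stated in full; the proofs are below) =====
def Claim_equal_findPermutation : Prop := ∀ (s : String), Dom_findPermutation s → Spec_findPermutation s (findPermutation s)

-- ===== LEMMAS AND PROOFS =====

-- ascending run of Int values a, a+1, …, a+m-1
def asc (a m : Nat) : List Int :=
  match m with
  | 0 => []
  | m + 1 => (a : Int) :: asc (a + 1) m

theorem asc_length (a m : Nat) : (asc a m).length = m := by
  induction m generalizing a with
  | zero => rfl
  | succ m ih => simp [asc, ih]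

theorem asc_take (a m k : Nat) : (asc a m).take k = asc a (min k m) := by
  induction m generalizing a k with
  | zero => simp [asc]
  | succ m ih =>
    cases k with
    | zero => simp [asc]
    | succ k => simp [asc, ih, Nat.succ_min_succ]

theorem asc_drop (a m k : Nat) : (asc a m).drop k = asc (a + k) (m - k) := by
  induction m generalizing a k with
  | zero => simp [asc]
  | succ m ih =>
    cases k with
    | zero => simp [asc]
    | succ k =>
      simp only [asc, List.drop_succ_cons, ih]
      congr 1 <;> omega

theorem asc_snoc (a m : Nat) : asc a (m + 1) = asc a m ++ [((a + m : Nat) : Int)] := by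
  induction m generalizing a with
  | zero => simp [asc]
  | succ m ih =>
    rw [show a + (m + 1) = (a + 1) + m from by omega]
    rw [show asc a (m + 1 + 1) = (a : Int) :: asc (a + 1) (m + 1) from rfl, ih]
    rfl

theorem range_map_eq_asc (n : Nat) :
    List.map (fun k : Nat => (k : Int) + 1) (List.range n) = asc 1 n := by
  induction n with
  | zero => rfl
  | succ n ih =>
    rw [List.range_succ, List.map_append, ih, asc_snoc]
    rw [show 1 + n = n + 1 from by omega]
    push_cast
    simp

-- characterization of the inner while loop of A
theorem dScan_spec (cs : List Char) (i : Nat) (hi : i ≤ cs.length) :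
    i ≤ dScan cs i ∧ dScan cs i ≤ cs.length ∧
    (∀ t, i ≤ t → t < dScan cs i → cs.getD t ' ' = 'D') ∧
    (dScan cs i = cs.length ∨ cs.getD (dScan cs i) ' ' ≠ 'D') := by
  generalize hm : cs.length - i = m
  induction m generalizing i with
  | zero =>
    have hie : i = cs.length := by omega
    rw [dScan, dif_neg (by intro h; omega)]
    exact ⟨le_refl _, hi, fun t h1 h2 => absurd h2 (by omega), Or.inl hie⟩
  | succ m ih =>
    by_cases h : i < cs.length ∧ cs.getD i ' ' = 'D'
    · obtain ⟨hl, hD⟩ := h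
      rw [dScan, dif_pos ⟨hl, hD⟩]
      obtain ⟨h1, h2, h3, h4⟩ := ih (i + 1) hl (by omega)
      exact ⟨by omega, h2,
        fun t ht1 ht2 => (Nat.eq_or_lt_of_le ht1).elim (fun e => e ▸ hD) (fun hlt => h3 t hlt ht2),
        h4⟩
    · rw [dScan, dif_neg h]
      refine ⟨le_refl _, hi, fun t ht1 ht2 => absurd ht2 (by omega), ?_⟩
      rcases Nat.lt_or_ge i cs.length with hl | hl
      · exact Or.inr fun hd => h ⟨hl, hd⟩
      · exact Or.inl (by omega)

-- B runs through a 'D' chain [i, j) and flushes the accumulated stack at j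
theorem loopB_run (cs : List Char) (j : Nat) (hj : j ≤ cs.length)
    (hstop : j = cs.length ∨ cs.getD j ' ' ≠ 'D') :
    ∀ m i, i ≤ j → j - i = m → (∀ t, i ≤ t → t < j → cs.getD t ' ' = 'D') →
    ∀ (stack res : List Int),
      loopB cs i stack res =
        loopB cs (j + 1) [] (res ++ ((asc (i + 1) (j - i + 1)).reverse ++ stack)) := by
  intro m
  induction m with
  | zero =>
    intro i hij hm _ stack res
    have hie : i = j := by omega
    subst hie
    rw [loopB, if_pos (by omega), if_pos hstop]
    congr 1
    simp [asc]
  | succ m ih =>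
    intro i hij hm hD stack res
    have hiD : cs.getD i ' ' = 'D' := hD i (le_refl _) (by omega)
    have hil : i < cs.length := by omega
    rw [loopB, if_pos (by omega),
      if_neg (by rintro (hc | hc); exacts [absurd hc (by omega), hc hiD])]
    rw [ih (i + 1) (by omega) (by omega) (fun t ht1 ht2 => hD t (by omega) ht2)]
    congr 1
    rw [show j - i + 1 = (j - (i + 1) + 1) + 1 from by omega]
    simp [asc, List.reverse_cons, List.append_assoc]

-- end of the string: A exits; B pushes n and flushes, then exits
theorem main_base (cs : List Char) (i : Nat) (hie : i = cs.length) (done : List Int)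
    (_hd : done.length = i) :
    loopA cs (done ++ asc (i + 1) (cs.length + 1 - i)) i = loopB cs i [] done := by
  rw [loopA, dif_neg (by omega)]
  rw [loopB, if_pos (by omega), if_pos (Or.inl hie)]
  rw [loopB, if_neg (by omega)]
  rw [show cs.length + 1 - i = 1 from by omega]
  simp [asc]

-- the main invariant: A at index i over the untouched ascending tail equals B restarted
-- at i with an empty stack and the finished prefix `done`
theorem main_inv (cs : List Char) :
    ∀ m i, i ≤ cs.length → cs.length - i ≤ m → ∀ done : List Int, done.length = i →
      loopA cs (done ++ asc (i + 1) (cs.length + 1 - i)) i = loopB cs i [] done := by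
  intro m
  induction m with
  | zero =>
    intro i hi hm done hd
    exact main_base cs i (by omega) done hd
  | succ m ih =>
    intro i hi hm done hd
    by_cases hE : i = cs.length
    · exact main_base cs i hE done hd
    have hlt : i < cs.length := by omega
    by_cases hI : cs.getD i ' ' = 'I'
    · -- 'I' step: both sides advance by one; value i+1 is finished
      rw [loopA, dif_pos hlt, if_pos hI]
      have hrw : done ++ asc (i + 1) (cs.length + 1 - i) =
          (done ++ [((i : Int) + 1)]) ++ asc ((i + 1) + 1) (cs.length + 1 - (i + 1)) := by
        rw [show cs.length + 1 - i = (cs.length + 1 - (i + 1)) + 1 from by omega]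
        simp [asc]
      rw [hrw, ih (i + 1) (by omega) (by omega) _ (by simp [hd])]
      rw [loopB_run cs i (by omega) (by rw [hI]; right; decide) 0 i (le_refl _) (by omega)
        (fun t h1 h2 => absurd h2 (by omega)) [] done]
      simp [asc]
    · -- maximal 'D' chain (possibly empty, when cs[i] is neither 'I' nor 'D')
      rw [loopA]
      simp only [dif_pos hlt, if_neg hI]
      obtain ⟨hj1, hj2, hj3, hj4⟩ := dScan_spec cs i (by omega)
      generalize hjdef : dScan cs i = j at hj1 hj2 hj3 hj4 ⊢
      have ht : (done ++ asc (i + 1) (cs.length + 1 - i)).take i = done := by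
        rw [List.take_append_of_le_length (by omega), ← hd, List.take_length]
      have hdp : (done ++ asc (i + 1) (cs.length + 1 - i)).drop i =
          asc (i + 1) (cs.length + 1 - i) := by
        rw [List.drop_append_of_le_length (by omega), ← hd, List.drop_length, List.nil_append]
      have hmid : ((done ++ asc (i + 1) (cs.length + 1 - i)).drop i).take (j - i + 1) =
          asc (i + 1) (j - i + 1) := by
        rw [hdp, asc_take]
        congr 1
        omega
      have hdrp : (done ++ asc (i + 1) (cs.length + 1 - i)).drop (i + (j - i + 1)) =
          asc (i + (j - i + 1) + 1) (cs.length + 1 - i - (j - i + 1)) := by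
        rw [← List.drop_drop, hdp, asc_drop]
        congr 1
        omega
      rw [ht, hmid, hdrp]
      have hB := loopB_run cs j hj2 hj4 (j - i) i hj1 rfl hj3 [] done
      by_cases hjend : j = cs.length
      · -- the chain runs to the end of the string: both loops terminate with the reversal
        rw [show cs.length + 1 - i - (j - i + 1) = 0 from by omega]
        rw [loopA, dif_neg (by omega)]
        rw [hB, loopB, if_neg (by omega)]
        simp [asc]
      · -- the chain ends before the end of the string: continue at i + (j - i + 1)
        have hie : i + (j - i + 1) ≤ cs.length := by omega
        rw [show cs.length + 1 - i - (j - i + 1) = cs.length + 1 - (i + (j - i + 1)) from by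
          omega]
        rw [ih (i + (j - i + 1)) hie (by omega) (done ++ (asc (i + 1) (j - i + 1)).reverse)
          (by simp [asc_length, hd])]
        rw [hB, show j + 1 = i + (j - i + 1) from by omega]
        simp

-- ===== VERDICT (by name: the statement is the Claim_ definition above) =====
theorem findPermutation_spec : Claim_equal_findPermutation := by
  intro s _
  unfold Spec_findPermutation findPermutation findPermutation_alt
  simp only
  rw [range_map_eq_asc]
  have := main_inv s.toList (s.toList.length) 0 (Nat.zero_le _) (by omega) [] rfl
  simpa using this
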